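-- pv_equiv track=rewrite | github.com/LSuessmuth/hectoc-NoC | hectoc.py | apply_parenthesis
-- ===== SOURCE A (Python) =====
-- def apply_parenthesis(expr, par_list: list[tuple[int]]) -> str:
--     positions_to_substrings = {idx: val for idx, val in enumerate(expr)}
--     for left_par_idx, right_par_idx in par_list:
--         positions_to_substrings[left_par_idx] = (
--             "(" + positions_to_substrings[left_par_idx]
--         )
--         positions_to_substrings[right_par_idx] += ")"
--
--     return "".join(
--         [positions_to_substrings[key] for key in sorted(positions_to_substrings)]
--     )
-- ===== SOURCE B (Python) =====
-- def apply_parenthesis(expr, par_list: list[tuple[int]]) -> str: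
--     n = len(expr)
--     opens = [0] * n
--     closes = [0] * n
--     for left_par_idx, right_par_idx in par_list:
--         opens[left_par_idx] += 1
--         closes[right_par_idx] += 1
--     return "".join(
--         "(" * opens[i] + expr[i] + ")" * closes[i] for i in range(n)
--     )
-- ===== Notes on version B (the rewrite author's own statement) =====
-- stated objective: faster
-- what changed: Replaces A's dict of per-position string fragments (built by repeated string concatenation) and final sorted() over the keys with two flat integer counter arrays filled in one pass over par_list, then a single left-to-right join assembling '('*opens[i] + expr[i] + ')'*closes[i]; no dict and no sort.
import Mathlib
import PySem

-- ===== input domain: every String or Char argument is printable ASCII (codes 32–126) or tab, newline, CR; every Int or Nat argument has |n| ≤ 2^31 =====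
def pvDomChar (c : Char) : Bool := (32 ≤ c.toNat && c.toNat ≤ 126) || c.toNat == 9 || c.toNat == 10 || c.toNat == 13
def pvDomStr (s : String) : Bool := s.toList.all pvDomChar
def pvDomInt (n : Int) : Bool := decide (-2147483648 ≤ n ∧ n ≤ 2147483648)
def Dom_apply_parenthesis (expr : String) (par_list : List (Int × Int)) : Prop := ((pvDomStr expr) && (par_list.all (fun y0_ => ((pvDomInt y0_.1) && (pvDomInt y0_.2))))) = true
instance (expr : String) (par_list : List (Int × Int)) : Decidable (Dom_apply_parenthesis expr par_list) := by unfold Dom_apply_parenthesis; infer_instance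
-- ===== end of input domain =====

-- B replaces A's dict of per-position string fragments plus a final key sort by two per-index
-- parenthesis counters and a single left-to-right assembly pass (no dict, no sort); objective: simpler.

-- ===== PORT A =====
-- Python str values are carried as List Char (exact: '+' on str is List.append, ''.join is flatten);
-- the dict reads positions_to_substrings[k] use getD _ [] — exact under Pre_, which guarantees the key exists.
def pvInitA (cs : List Char) : PySem.Dict Int (List Char) :=
  PySem.Dict.ofList ((PySem.List.enumerate cs 0).map (fun p => (p.1, [p.2])))

def pvStepA (d : PySem.Dict Int (List Char)) (p : Int × Int) : PySem.Dict Int (List Char) :=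
  let d1 := d.insert p.1 ('(' :: d.getD p.1 [])
  d1.insert p.2 (d1.getD p.2 [] ++ [')'])

def apply_parenthesis (expr : String) (par_list : List (Int × Int)) : String :=
  let d := par_list.foldl pvStepA (pvInitA expr.toList)
  String.ofList (((PySem.List.sorted d.keys (fun k => k)).map (fun k => d.getD k [])).flatten)

-- ===== PORT B =====
-- opens[left] += 1 / closes[right] += 1 via PySem.List.pyGetD/pySetD (Python list indexing, incl. negative wrap).
def pvStepB (oc : List Nat × List Nat) (p : Int × Int) : List Nat × List Nat :=
  (PySem.List.pySetD oc.1 p.1 (PySem.List.pyGetD oc.1 p.1 0 + 1),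
   PySem.List.pySetD oc.2 p.2 (PySem.List.pyGetD oc.2 p.2 0 + 1))

def apply_parenthesis_alt (expr : String) (par_list : List (Int × Int)) : String :=
  let cs := expr.toList
  let n := cs.length
  let oc := par_list.foldl pvStepB (List.replicate n 0, List.replicate n 0)
  String.ofList (((List.range n).map (fun i =>
    List.replicate (oc.1.getD i 0) '(' ++ [cs.getD i ' '] ++ List.replicate (oc.2.getD i 0) ')')).flatten)

-- ===== PRECONDITION & SPEC =====
-- Pre_: every parenthesis position is an index of expr; outside this A raises KeyError.
def Pre_apply_parenthesis (expr : String) (par_list : List (Int × Int)) : Prop :=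
  ∀ p ∈ par_list, 0 ≤ p.1 ∧ p.1 < (expr.toList.length : Int) ∧ 0 ≤ p.2 ∧ p.2 < (expr.toList.length : Int)
instance (expr : String) (par_list : List (Int × Int)) : Decidable (Pre_apply_parenthesis expr par_list) := by unfold Pre_apply_parenthesis; infer_instance
def pvWitness_apply_parenthesis : String × (List (Int × Int)) := ("1+2*3", [(0, 2), (2, 4)])
def Spec_apply_parenthesis (expr : String) (par_list : List (Int × Int)) (out : String) : Prop := out = apply_parenthesis_alt expr par_list
instance (expr : String) (par_list : List (Int × Int)) (out : String) : Decidable (Spec_apply_parenthesis expr par_list out) := by unfold Spec_apply_parenthesis; infer_instance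

-- ===== CLAIM (what is proved, stated in full; the proofs are below) =====
def Claim_equal_apply_parenthesis : Prop := ∀ (expr : String) (par_list : List (Int × Int)), Dom_apply_parenthesis expr par_list → Pre_apply_parenthesis expr par_list → Spec_apply_parenthesis expr par_list (apply_parenthesis expr par_list)

-- ===== LEMMAS AND PROOFS =====

theorem rep_shift {α : Type} (n : Nat) (a : α) (l : List α) :
    List.replicate n a ++ a :: l = a :: (List.replicate n a ++ l) := by
  induction n with
  | zero => rfl
  | succ n ih => simp [List.replicate_succ, ih]

-- A's loop, pointwise: each pair (a, b) prepends one '(' at key a and appends one ')' at key b.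
theorem foldA_getD (l : List (Int × Int)) (d : PySem.Dict Int (List Char)) (i : Int) :
    (List.foldl pvStepA d l).getD i []
      = List.replicate ((l.map Prod.fst).count i) '(' ++ d.getD i []
          ++ List.replicate ((l.map Prod.snd).count i) ')' := by
  induction l generalizing d with
  | nil => simp
  | cons p l ih =>
    rcases p with ⟨a, b⟩
    simp only [List.foldl_cons, List.map_cons, List.count_cons]
    rw [ih]
    simp only [pvStepA, PySem.Dict.getD_insert]
    by_cases ha : i = a <;> by_cases hb : i = b
    · have hab : b = a := by rw [← ha, ← hb]
      simp [ha, hab, rep_shift, List.replicate_succ, List.append_assoc]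
    · have hba : ¬ b = a := fun h => hb (ha.trans h.symm)
      have hab2 : ¬ a = b := fun h => hb (ha.trans h)
      simp [ha, hba, hab2, rep_shift, List.replicate_succ, List.append_assoc]
    · have hba : ¬ b = a := fun h => ha (hb.trans h)
      have hab2 : ¬ a = b := fun h => ha (hb.trans h.symm)
      simp [hb, hba, hab2, List.replicate_succ, List.append_assoc]
    · have hai : ¬ a = i := fun h => ha h.symm
      have hbi : ¬ b = i := fun h => hb h.symm
      simp [ha, hb, hai, hbi]

-- A's loop never adds a key when every position is already a key.
theorem foldA_keys (l : List (Int × Int)) (d : PySem.Dict Int (List Char))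
    (h : ∀ p ∈ l, d.contains p.1 = true ∧ d.contains p.2 = true) :
    (List.foldl pvStepA d l).keys = d.keys := by
  induction l generalizing d with
  | nil => rfl
  | cons p l ih =>
    have h1 := (h p (List.mem_cons_self)).1
    have h2 := (h p (List.mem_cons_self)).2
    have hc2 : (d.insert p.1 ('(' :: d.getD p.1 [])).contains p.2 = true := by
      simp [PySem.Dict.contains_insert, h2]
    have hkeys : (pvStepA d p).keys = d.keys := by
      unfold pvStepA
      rw [PySem.Dict.keys_insert_of_contains _ _ hc2, PySem.Dict.keys_insert_of_contains _ _ h1]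
    have htail : ∀ q ∈ l, (pvStepA d p).contains q.1 = true ∧ (pvStepA d p).contains q.2 = true := by
      intro q hq
      have hq2 := h q (List.mem_cons_of_mem _ hq)
      constructor <;> simp [pvStepA, PySem.Dict.contains_insert, hq2.1, hq2.2]
    simp only [List.foldl_cons]
    rw [ih _ htail, hkeys]

theorem initA_items (cs : List Char) :
    (pvInitA cs).items = (PySem.List.enumerate cs 0).map (fun p => (p.1, [p.2])) := by
  have hn : (((PySem.List.enumerate cs 0).map (fun p => (p.1, ([p.2] : List Char)))).map Prod.fst).Nodup := by
    have h1 : ((PySem.List.enumerate cs 0).map (fun p => (p.1, ([p.2] : List Char)))).map Prod.fst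
        = (PySem.List.enumerate cs 0).map (fun p => p.1) := by
      rw [List.map_map]; rfl
    rw [h1, PySem.List.map_fst_enumerate]
    exact PySem.List.nodup_pyRange_one _ _
  have h := PySem.Dict.items_foldl_insert_fresh
      ((PySem.List.enumerate cs 0).map (fun p => (p.1, ([p.2] : List Char))))
      Prod.fst Prod.snd PySem.Dict.empty
      (by intro a _; simp [PySem.Dict.contains_empty]) hn
  show (List.foldl (fun (d : PySem.Dict Int (List Char)) (p : Int × List Char) => d.insert p.1 p.2) PySem.Dict.empty ((PySem.List.enumerate cs 0).map (fun p => (p.1, [p.2])))).items = _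
  simpa using h

theorem initA_keys (cs : List Char) :
    (pvInitA cs).keys = PySem.List.pyRange 0 (cs.length) := by
  unfold PySem.Dict.keys
  rw [initA_items, List.map_map]
  have h1 : (PySem.List.enumerate cs 0).map ((fun p => p.1) ∘ (fun p => (p.1, ([p.2] : List Char))))
      = (PySem.List.enumerate cs 0).map (fun p => p.1) := rfl
  rw [h1, PySem.List.map_fst_enumerate]
  norm_num

theorem initA_getD (cs : List Char) (j : Nat) (hj : j < cs.length) :
    (pvInitA cs).getD (j : Int) [] = [cs[j]] := by
  apply PySem.Dict.getD_of_mem_items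
  · rw [initA_items]
    exact List.mem_map.2 ⟨((j : Int), cs[j]),
      (PySem.List.mem_enumerate_iff cs 0 _).2 ⟨j, hj, by simp⟩, rfl⟩
  · exact PySem.Dict.nodup_keys_ofList _

-- B's loop splits into two independent count folds.
theorem foldPair_fst (l : List (Int × Int)) (o c : List Nat) :
    (List.foldl pvStepB (o, c) l).1
      = List.foldl (fun o x => PySem.List.pySetD o x (PySem.List.pyGetD o x 0 + 1)) o (l.map Prod.fst) := by
  induction l generalizing o c with
  | nil => rfl
  | cons p l ih => simp only [List.foldl_cons, List.map_cons]; exact ih _ _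

theorem foldPair_snd (l : List (Int × Int)) (o c : List Nat) :
    (List.foldl pvStepB (o, c) l).2
      = List.foldl (fun c x => PySem.List.pySetD c x (PySem.List.pyGetD c x 0 + 1)) c (l.map Prod.snd) := by
  induction l generalizing o c with
  | nil => rfl
  | cons p l ih => simp only [List.foldl_cons, List.map_cons]; exact ih _ _

-- a count fold over in-range Int indices counts occurrences.
theorem foldB_count : ∀ (l : List Int) (o : List Nat),
    (∀ x ∈ l, 0 ≤ x ∧ x < (o.length : Int)) → ∀ (j : Nat), j < o.length →
    (List.foldl (fun o x => PySem.List.pySetD o x (PySem.List.pyGetD o x 0 + 1)) o l).getD j 0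
      = o.getD j 0 + l.count (j : Int)
  | [], o, _, j, hj => by simp
  | x :: l, o, hl, j, hj => by
    have hx := hl x List.mem_cons_self
    have hxn : (x.toNat : Int) = x := Int.toNat_of_nonneg hx.1
    have hlt : x.toNat < o.length := by omega
    have hstep : PySem.List.pySetD o x (PySem.List.pyGetD o x 0 + 1)
        = o.set x.toNat (o.getD x.toNat 0 + 1) := by
      have hget : PySem.List.pyGetD o x 0 = o.getD x.toNat 0 :=
        PySem.List.pyGetD_of_nonneg o 0 hx.1
      have hset : PySem.List.pySet? o x (o.getD x.toNat 0 + 1)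
          = some (o.set x.toNat (o.getD x.toNat 0 + 1)) := by
        rw [← hxn]; exact PySem.List.pySet?_natCast o x.toNat _ hlt
      show (PySem.List.pySet? o x (PySem.List.pyGetD o x 0 + 1)).getD o = _
      rw [hget, hset]; rfl
    have hlen : (o.set x.toNat (o.getD x.toNat 0 + 1)).length = o.length := by simp
    simp only [List.foldl_cons, List.count_cons]
    rw [hstep, foldB_count l _ (by rw [hlen]; exact fun y hy => hl y (List.mem_cons_of_mem _ hy))
        j (by rw [hlen]; exact hj)]
    by_cases hjx : x.toNat = j
    · have hje : (j : Int) = x := by omega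
      have hxl : x.toNat < o.length := by omega
      have : (o.set x.toNat (o.getD x.toNat 0 + 1)).getD j 0 = o.getD x.toNat 0 + 1 := by
        rw [List.getD_eq_getElem?_getD, List.getElem?_set, if_pos hjx, if_pos hxl]
        rfl
      rw [this, hjx, hje]
      simp; omega
    · have hje2 : ¬ (x = (j : Int)) := by omega
      have : (o.set x.toNat (o.getD x.toNat 0 + 1)).getD j 0 = o.getD j 0 := by
        rw [List.getD_eq_getElem?_getD, List.getElem?_set, if_neg hjx, ← List.getD_eq_getElem?_getD]
      rw [this]
      simp [hje2]

-- ===== VERDICT (by name: the statement is the Claim_ definition above) =====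
theorem apply_parenthesis_spec : Claim_equal_apply_parenthesis := by
  intro expr par_list _ hpre
  unfold Spec_apply_parenthesis
  simp only [apply_parenthesis, apply_parenthesis_alt]
  have hpre' : ∀ p ∈ par_list, 0 ≤ p.1 ∧ p.1 < (expr.toList.length : Int)
      ∧ 0 ≤ p.2 ∧ p.2 < (expr.toList.length : Int) := hpre
  have hkinit := initA_keys expr.toList
  have hcont : ∀ p ∈ par_list, (pvInitA expr.toList).contains p.1 = true
      ∧ (pvInitA expr.toList).contains p.2 = true := by
    intro p hp
    have h := hpre' p hp
    constructor <;> rw [PySem.Dict.contains_iff_mem_keys, hkinit, PySem.List.mem_pyRange_one]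
    · exact ⟨h.1, h.2.1⟩
    · exact ⟨h.2.2.1, h.2.2.2⟩
  have hkeys : (par_list.foldl pvStepA (pvInitA expr.toList)).keys
      = PySem.List.pyRange 0 (expr.toList.length) := by
    rw [foldA_keys par_list _ hcont, hkinit]
  have hsorted : PySem.List.sorted (par_list.foldl pvStepA (pvInitA expr.toList)).keys (fun k => k)
      = PySem.List.pyRange 0 (expr.toList.length) := by
    rw [hkeys]
    exact PySem.List.sorted_eq_self_of_pairwise _ _
      ((PySem.List.pairwise_lt_pyRange_one _ _).imp (fun h => le_of_lt h))
  rw [hsorted, PySem.List.pyRange_zero_nat, List.map_map]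
  apply congrArg String.ofList
  apply congrArg List.flatten
  apply List.map_congr_left
  intro k hk
  have hkn : k < expr.toList.length := List.mem_range.1 hk
  have hkn' : k < expr.length := by simpa using hkn
  -- A's element at position k
  have hA : (par_list.foldl pvStepA (pvInitA expr.toList)).getD (k : Int) []
      = List.replicate ((par_list.map Prod.fst).count (k : Int)) '('
          ++ [expr.toList[k]] ++ List.replicate ((par_list.map Prod.snd).count (k : Int)) ')' := by
    rw [foldA_getD, initA_getD expr.toList k hkn]
    rfl
  -- B's counters at position k
  have hbound1 : ∀ x ∈ par_list.map Prod.fst,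
      0 ≤ x ∧ x < ((List.replicate expr.toList.length (0 : Nat)).length : Int) := by
    intro x hx
    obtain ⟨p, hp, rfl⟩ := List.mem_map.1 hx
    exact ⟨(hpre' p hp).1, by simpa using (hpre' p hp).2.1⟩
  have hbound2 : ∀ x ∈ par_list.map Prod.snd,
      0 ≤ x ∧ x < ((List.replicate expr.toList.length (0 : Nat)).length : Int) := by
    intro x hx
    obtain ⟨p, hp, rfl⟩ := List.mem_map.1 hx
    exact ⟨(hpre' p hp).2.2.1, by simpa using (hpre' p hp).2.2.2⟩
  have hB1 : ((par_list.foldl pvStepB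
        (List.replicate expr.toList.length 0, List.replicate expr.toList.length 0)).1).getD k 0
      = (par_list.map Prod.fst).count (k : Int) := by
    rw [foldPair_fst, foldB_count _ _ hbound1 k (by simpa using hkn)]
    simp [List.getD_eq_getElem?_getD, hkn']
  have hB2 : ((par_list.foldl pvStepB
        (List.replicate expr.toList.length 0, List.replicate expr.toList.length 0)).2).getD k 0
      = (par_list.map Prod.snd).count (k : Int) := by
    rw [foldPair_snd, foldB_count _ _ hbound2 k (by simpa using hkn)]
    simp [List.getD_eq_getElem?_getD, hkn']
  simp only [Function.comp]
  rw [hA, hB1, hB2, List.getD_eq_getElem?_getD, List.getElem?_eq_getElem hkn]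
  rfl
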